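-- pv_equiv track=rewrite | github.com/Yukun-Huang/Google-KickStart | 2018 Round C/Problem C/python/C.py | solution_final
-- ===== SOURCE A (Python) =====
-- def solution_final(N, K, A):
--     result = 0
--     GP_sum = K # Handling p = 1 case separately.
--     mod = 1000000007
--     for x in range(1, N+1):
--         if x != 1:
--             GP_sum = GP_sum + x * (pow(x, K, mod)-1) * pow(x-1, mod-2, mod) # Multipyting by inverse modulo of x-1.
--             GP_sum %= mod
--         result = result + GP_sum * A[x-1] * (N-x+1)
--         result %= mod
--     return result
-- ===== SOURCE B (Python) =====
-- def solution_final(N, K, A):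
--     # Swapped summation order: suffix weights first (backward pass), then
--     # term(j) * W(j) (forward pass).  Same value mod 1000000007 as the
--     # prefix-sum formulation.
--     mod = 1000000007
--     suffix = []  # suffix[i] = W(N-i) = sum_{x=N-i..N} A[x-1]*(N-x+1) mod p
--     acc = 0
--     for j in range(N, 0, -1):
--         acc = (acc + A[j-1] * (N - j + 1)) % mod
--         suffix.append(acc)
--     result = 0
--     for j in range(1, N+1):
--         if j == 1:
--             term = K
--         else:
--             term = j * (pow(j, K, mod) - 1) * pow(j-1, mod-2, mod)
--         result = (result + term * suffix[N-j]) % mod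
--     return result
-- ===== Notes on version B (the rewrite author's own statement) =====
-- stated objective: alternative
-- what changed: Summation order is swapped: instead of carrying a running geometric-progression prefix sum through one loop, B precomputes suffix weights W(j)=sum_{x=j..N} A[x-1]*(N-x+1) mod p in a backward pass and then sums term(j)*W(j) in a separate forward pass.
import Mathlib
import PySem

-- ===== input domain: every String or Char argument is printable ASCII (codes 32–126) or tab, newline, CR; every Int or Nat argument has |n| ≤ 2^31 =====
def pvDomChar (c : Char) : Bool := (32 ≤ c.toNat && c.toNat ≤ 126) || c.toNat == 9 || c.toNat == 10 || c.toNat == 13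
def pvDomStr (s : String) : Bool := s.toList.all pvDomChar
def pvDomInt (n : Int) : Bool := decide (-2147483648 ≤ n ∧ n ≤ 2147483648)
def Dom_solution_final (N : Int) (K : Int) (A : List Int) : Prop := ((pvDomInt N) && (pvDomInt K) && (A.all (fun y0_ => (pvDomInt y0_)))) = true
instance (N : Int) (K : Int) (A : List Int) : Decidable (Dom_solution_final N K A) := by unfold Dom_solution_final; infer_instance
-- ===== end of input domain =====

-- B swaps the summation order (suffix-weight backward pass, then a term*weight forward
-- pass) instead of A's single loop with a running geometric-progression prefix sum;
-- same value, objective: alternative decomposition.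

-- ===== PORT A =====
-- pvPow b e m ports Python's built-in pow(b, e, m) for m > 0; for e < 0 the modular
-- inverse is taken via Fermat, exact for the prime modulus 1000000007 used here on
-- invertible bases (the non-invertible base, where Python raises ValueError, is
-- excluded by Pre_solution_final).
def pvPow (b : Int) (e : Int) (m : Int) : Int :=
  if 0 ≤ e then PySem.Int.powMod b e.toNat m
  else PySem.Int.powMod (PySem.Int.powMod b (m - 2).toNat m) (-e).toNat m

def pvStepA (N K : Int) (A : List Int) (s : Int × Int) (x : Int) : Int × Int :=
  let GP := if x ≠ 1 then
      PySem.Int.mod (s.2 + x * (pvPow x K 1000000007 - 1) * pvPow (x - 1) (1000000007 - 2) 1000000007) 1000000007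
    else s.2
  (PySem.Int.mod (s.1 + GP * PySem.List.pyGetD A (x - 1) 0 * (N - x + 1)) 1000000007, GP)

def solution_final (N : Int) (K : Int) (A : List Int) : Int :=
  ((PySem.List.pyRange 1 (N + 1) 1).foldl (pvStepA N K A) (0, K)).1

-- ===== PORT B =====
def pvTerm (K : Int) (j : Int) : Int :=
  if j = 1 then K
  else j * (pvPow j K 1000000007 - 1) * pvPow (j - 1) (1000000007 - 2) 1000000007

def pvStepW (N : Int) (A : List Int) (s : Int × List Int) (j : Int) : Int × List Int :=
  let acc := PySem.Int.mod (s.1 + PySem.List.pyGetD A (j - 1) 0 * (N - j + 1)) 1000000007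
  (acc, s.2 ++ [acc])

def solution_final_alt (N : Int) (K : Int) (A : List Int) : Int :=
  let suffix := ((PySem.List.pyRange N 0 (-1)).foldl (pvStepW N A) (0, [])).2
  (PySem.List.pyRange 1 (N + 1) 1).foldl
    (fun r j => PySem.Int.mod (r + pvTerm K j * PySem.List.pyGetD suffix (N - j) 0) 1000000007) 0

-- ===== PRECONDITION & SPEC =====
-- Pre_ excludes exactly the inputs where the Python A raises: IndexError when N exceeds
-- len(A) (with at least one loop iteration), and ValueError from pow with a negative
-- exponent at the non-invertible base x = 1000000007, reached only when K < 0 and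
-- N ≥ 1000000007.
def Pre_solution_final (N : Int) (K : Int) (A : List Int) : Prop :=
  N ≤ (A.length : Int) ∧ (K < 0 → N < 1000000007)
instance (N : Int) (K : Int) (A : List Int) : Decidable (Pre_solution_final N K A) := by
  unfold Pre_solution_final; infer_instance

def pvWitness_solution_final : Int × Int × List Int := (2, 2, [1, 2])

def Spec_solution_final (N : Int) (K : Int) (A : List Int) (out : Int) : Prop :=
  out = solution_final_alt N K A
instance (N : Int) (K : Int) (A : List Int) (out : Int) : Decidable (Spec_solution_final N K A out) := by
  unfold Spec_solution_final; infer_instance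

-- ===== CLAIM (what is proved, stated in full; the proofs are below) =====
def Claim_equal_solution_final : Prop := ∀ (N : Int) (K : Int) (A : List Int), Dom_solution_final N K A → Pre_solution_final N K A → Spec_solution_final N K A (solution_final N K A)

-- ===== LEMMAS AND PROOFS =====

-- proof-side abbreviations
def tg (K : Int) (j : ℕ) : Int := pvTerm K ((j : Int) + 1)
def cg (N : Int) (A : List Int) (i : ℕ) : Int := PySem.List.pyGetD A (i : Int) 0 * (N - (i : Int))
def Sg (K : Int) (x : ℕ) : Int := ∑ j ∈ Finset.range x, tg K j
def Wg (N : Int) (A : List Int) (n j : ℕ) : Int := ∑ x ∈ Finset.Ico j n, cg N A x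
def TotA (N K : Int) (A : List Int) (n : ℕ) : Int := ∑ x ∈ Finset.range n, Sg K (x + 1) * cg N A x
def TotB (N K : Int) (A : List Int) (n m : ℕ) : Int := ∑ j ∈ Finset.range m, tg K j * Wg N A n j

-- recursion views of the three loops
def gA (N K : Int) (A : List Int) : ℕ → Int × Int
  | 0 => (0, K)
  | m + 1 => pvStepA N K A (gA N K A m) ((m : Int) + 1)

def avB (N : Int) (A : List Int) : ℕ → Int
  | 0 => 0
  | k + 1 => PySem.Int.mod (avB N A k + PySem.List.pyGetD A (N - (k : Int) - 1) 0 * (N - (N - (k : Int)) + 1)) 1000000007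

def rB (N K : Int) (A : List Int) : ℕ → Int
  | 0 => 0
  | m + 1 => PySem.Int.mod
      (rB N K A m + pvTerm K ((m : Int) + 1) *
        PySem.List.pyGetD ((List.range N.toNat).map (fun i => avB N A (i + 1))) (N - ((m : Int) + 1)) 0)
      1000000007

lemma pmod_eq (x : Int) : PySem.Int.mod x 1000000007 = x % 1000000007 :=
  PySem.Int.mod_eq_emod_of_pos (by norm_num)

lemma pmod_bounds (x : Int) : 0 ≤ x % 1000000007 ∧ x % 1000000007 < 1000000007 :=
  ⟨Int.emod_nonneg x (by norm_num), Int.emod_lt_of_pos x (by norm_num)⟩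

lemma pmod_cong (x : Int) : x % 1000000007 ≡ x [ZMOD 1000000007] :=
  Int.emod_emod_of_dvd x dvd_rfl

-- a foldl over (range n).map g is any recursion with the same step
lemma foldl_range_map_eq {σ : Type} (f : σ → Int → σ) (g : ℕ → Int) (init : σ) (h : ℕ → σ)
    (h0 : h 0 = init) (hs : ∀ m, h (m + 1) = f (h m) (g m)) :
    ∀ n, ((List.range n).map g).foldl f init = h n := by
  intro n
  induction n with
  | zero => simpa using h0.symm
  | succ m ih => simp [List.range_succ, ih, hs m]

lemma solA_eq (N K : Int) (A : List Int) : solution_final N K A = (gA N K A N.toNat).1 := by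
  have : PySem.List.pyRange 1 (N + 1) 1 = (List.range N.toNat).map (fun k : ℕ => (1 : Int) + (k : Int)) := by
    rw [PySem.List.pyRange_one, show N + 1 - 1 = N by ring]
  rw [solution_final, this,
    foldl_range_map_eq (pvStepA N K A) (fun k : ℕ => (1 : Int) + (k : Int)) (0, K) (gA N K A) rfl
      (fun m => by simp [gA, add_comm])]

lemma suffix_eq (N : Int) (A : List Int) :
    ((PySem.List.pyRange N 0 (-1)).foldl (pvStepW N A) (0, [])).2
      = (List.range N.toNat).map (fun i => avB N A (i + 1)) := by
  have hr : PySem.List.pyRange N 0 (-1) = (List.range N.toNat).map (fun k : ℕ => N - (k : Int)) := by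
    rw [PySem.List.pyRange_neg_one, show N - 0 = N by ring]
  rw [hr, foldl_range_map_eq (pvStepW N A) (fun k : ℕ => N - (k : Int)) (0, [])
      (fun m => (avB N A m, (List.range m).map (fun i => avB N A (i + 1)))) rfl
      (fun m => by simp [pvStepW, avB, List.range_succ])]

lemma solB_eq (N K : Int) (A : List Int) : solution_final_alt N K A = rB N K A N.toNat := by
  have hr : PySem.List.pyRange 1 (N + 1) 1 = (List.range N.toNat).map (fun k : ℕ => (1 : Int) + (k : Int)) := by
    rw [PySem.List.pyRange_one, show N + 1 - 1 = N by ring]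
  rw [solution_final_alt]
  rw [suffix_eq N A, hr,
    foldl_range_map_eq _ (fun k : ℕ => (1 : Int) + (k : Int)) 0 (rB N K A) rfl
      (fun m => by simp [rB, add_comm])]

-- the pure double-sum swap
lemma swap_sum (t c : ℕ → Int) :
    ∀ n, (∑ x ∈ Finset.range n, (∑ j ∈ Finset.range (x + 1), t j) * c x)
      = ∑ j ∈ Finset.range n, t j * ∑ x ∈ Finset.Ico j n, c x := by
  intro n
  induction n with
  | zero => simp
  | succ m ih =>
      have h1 : ∀ j ∈ Finset.range m, t j * ∑ x ∈ Finset.Ico j (m + 1), c x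
          = t j * ∑ x ∈ Finset.Ico j m, c x + t j * c m := by
        intro j hj
        rw [Finset.sum_Ico_succ_top (le_of_lt (Finset.mem_range.1 hj)), mul_add]
      rw [Finset.sum_range_succ, ih]
      conv_rhs => rw [Finset.sum_range_succ, Finset.sum_congr rfl h1, Finset.sum_add_distrib]
      have h3 : (∑ x ∈ Finset.Ico m (m + 1), c x) = c m := by simp
      rw [h3, Finset.sum_range_succ, ← Finset.sum_mul]
      ring

-- GP invariant of A's loop
lemma gA_snd (N K : Int) (A : List Int) :
    ∀ m, (gA N K A m).2 ≡ Sg K (max m 1) [ZMOD 1000000007] := by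
  intro m
  induction m with
  | zero => simp [gA, Sg, tg, pvTerm]
  | succ m ih =>
      rcases Nat.eq_zero_or_pos m with hm | hm
      · subst hm
        simp [gA, pvStepA, Sg, tg, pvTerm]
      · have hx : ((m : Int) + 1) ≠ 1 := by omega
        have : (gA N K A (m + 1)).2
            = ((gA N K A m).2 + tg K m) % 1000000007 := by
          simp [gA, pvStepA, hx, tg, pvTerm]
        rw [this]
        have ih' : (gA N K A m).2 ≡ Sg K m [ZMOD 1000000007] := by
          rwa [show max m 1 = m by omega] at ih
        have hmax' : max (m + 1) 1 = m + 1 := by omega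
        calc ((gA N K A m).2 + tg K m) % 1000000007
            ≡ (gA N K A m).2 + tg K m [ZMOD 1000000007] := pmod_cong _
          _ ≡ Sg K m + tg K m [ZMOD 1000000007] := Int.ModEq.add ih' (Int.ModEq.refl _)
          _ = Sg K (max (m + 1) 1) := by
              rw [hmax']
              simp [Sg, Finset.sum_range_succ]

-- result invariant of A's loop
lemma gA_fst (N K : Int) (A : List Int) :
    ∀ m, (gA N K A m).1 ≡ TotA N K A m [ZMOD 1000000007]
      ∧ (1 ≤ m → 0 ≤ (gA N K A m).1 ∧ (gA N K A m).1 < 1000000007) := by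
  intro m
  induction m with
  | zero => exact ⟨by simp [gA, TotA], by omega⟩
  | succ m ih =>
      have e1 : ((m : Int) + 1 - 1) = (m : Int) := by ring
      have e2 : (N - ((m : Int) + 1) + 1) = N - (m : Int) := by ring
      have hstep : (gA N K A (m + 1)).1
          = ((gA N K A m).1 + (gA N K A (m + 1)).2 * PySem.List.pyGetD A ((m : Int) + 1 - 1) 0 * (N - ((m : Int) + 1) + 1)) % 1000000007 := by
        conv_lhs => rw [show gA N K A (m + 1) = pvStepA N K A (gA N K A m) ((m : Int) + 1) from rfl]
        conv_rhs => rw [show (gA N K A (m + 1)).2 = (pvStepA N K A (gA N K A m) ((m : Int) + 1)).2 from rfl]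
        rw [pvStepA, pmod_eq]
      rw [e1, e2] at hstep
      constructor
      · rw [hstep]
        have hg : (gA N K A (m + 1)).2 ≡ Sg K (m + 1) [ZMOD 1000000007] := by
          have := gA_snd N K A (m + 1)
          rwa [show max (m + 1) 1 = m + 1 by omega] at this
        calc ((gA N K A m).1 + (gA N K A (m + 1)).2 * PySem.List.pyGetD A (m : Int) 0 * (N - (m : Int))) % 1000000007
            ≡ (gA N K A m).1 + (gA N K A (m + 1)).2 * PySem.List.pyGetD A (m : Int) 0 * (N - (m : Int)) [ZMOD 1000000007] := pmod_cong _
          _ ≡ TotA N K A m + Sg K (m + 1) * PySem.List.pyGetD A (m : Int) 0 * (N - (m : Int)) [ZMOD 1000000007] :=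
              Int.ModEq.add ih.1 (Int.ModEq.mul (Int.ModEq.mul hg (Int.ModEq.refl _)) (Int.ModEq.refl _))
          _ = TotA N K A (m + 1) := by
              rw [show TotA N K A (m + 1) = TotA N K A m + Sg K (m + 1) * cg N A m from Finset.sum_range_succ _ _, cg]
              ring
      · intro _
        rw [hstep]
        exact pmod_bounds _

-- suffix accumulator invariant of B's backward loop
lemma avB_inv (N : Int) (A : List Int) (hN : 0 ≤ N) :
    ∀ k, k ≤ N.toNat →
      (avB N A k ≡ Wg N A N.toNat (N.toNat - k) [ZMOD 1000000007]
        ∧ (1 ≤ k → 0 ≤ avB N A k ∧ avB N A k < 1000000007)) := by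
  have hcast : ((N.toNat : Int)) = N := Int.toNat_of_nonneg hN
  intro k
  induction k with
  | zero => exact fun _ => ⟨by simp [avB, Wg], by omega⟩
  | succ k ih =>
      intro hk
      have hk' : k ≤ N.toNat := Nat.le_of_succ_le hk
      have hklt : k < N.toNat := hk
      have hstep : avB N A (k + 1)
          = (avB N A k + cg N A (N.toNat - 1 - k)) % 1000000007 := by
        rw [avB, pmod_eq, cg]
        have e1 : ((N.toNat - 1 - k : ℕ) : Int) = N - (k : Int) - 1 := by omega
        rw [e1]
        ring_nf
      constructor
      · rw [hstep]
        have hW : Wg N A N.toNat (N.toNat - (k + 1))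
            = cg N A (N.toNat - 1 - k) + Wg N A N.toNat (N.toNat - k) := by
          have hb : N.toNat - (k + 1) < N.toNat := by omega
          rw [Wg, Finset.sum_eq_sum_Ico_succ_bot hb, ← Wg]
          congr 1
          · congr 1; omega
          · congr 1; omega
        calc (avB N A k + cg N A (N.toNat - 1 - k)) % 1000000007
            ≡ avB N A k + cg N A (N.toNat - 1 - k) [ZMOD 1000000007] := pmod_cong _
          _ ≡ Wg N A N.toNat (N.toNat - k) + cg N A (N.toNat - 1 - k) [ZMOD 1000000007] :=
              Int.ModEq.add ((ih hk').1) (Int.ModEq.refl _)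
          _ = Wg N A N.toNat (N.toNat - (k + 1)) := by rw [hW]; ring
      · intro _; rw [hstep]; exact pmod_bounds _

-- result invariant of B's forward loop
lemma rB_inv (N K : Int) (A : List Int) (hN : 0 ≤ N) :
    ∀ m, m ≤ N.toNat →
      (rB N K A m ≡ TotB N K A N.toNat m [ZMOD 1000000007]
        ∧ (1 ≤ m → 0 ≤ rB N K A m ∧ rB N K A m < 1000000007)) := by
  intro m
  induction m with
  | zero => exact fun _ => ⟨by simp [rB, TotB], by omega⟩
  | succ m ih =>
      intro hm
      have hm' : m ≤ N.toNat := Nat.le_of_succ_le hm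
      have hmlt : m < N.toNat := hm
      have hidx : PySem.List.pyGetD ((List.range N.toNat).map (fun i => avB N A (i + 1))) (N - ((m : Int) + 1)) 0
          = avB N A (N.toNat - m) := by
        have e1 : (N - ((m : Int) + 1)) = ((N.toNat - 1 - m : ℕ) : Int) := by omega
        rw [e1, PySem.List.pyGetD_natCast]
        have h2 : ((List.range N.toNat).map (fun i => avB N A (i + 1))).getD (N.toNat - 1 - m) 0
            = avB N A ((N.toNat - 1 - m) + 1) := by
          apply PySem.List.getD_map_range
          omega
        rw [h2]; congr 1; omega
      have hstep : rB N K A (m + 1)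
          = (rB N K A m + tg K m * avB N A (N.toNat - m)) % 1000000007 := by
        rw [rB, pmod_eq, hidx, tg]
      constructor
      · rw [hstep]
        have hav : avB N A (N.toNat - m) ≡ Wg N A N.toNat m [ZMOD 1000000007] := by
          have := (avB_inv N A hN (N.toNat - m) (by omega)).1
          rwa [show N.toNat - (N.toNat - m) = m by omega] at this
        calc (rB N K A m + tg K m * avB N A (N.toNat - m)) % 1000000007
            ≡ rB N K A m + tg K m * avB N A (N.toNat - m) [ZMOD 1000000007] := pmod_cong _
          _ ≡ TotB N K A N.toNat m + tg K m * Wg N A N.toNat m [ZMOD 1000000007] :=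
              Int.ModEq.add (ih hm').1 (Int.ModEq.mul (Int.ModEq.refl _) hav)
          _ = TotB N K A N.toNat (m + 1) := (Finset.sum_range_succ _ _).symm
      · intro _; rw [hstep]; exact pmod_bounds _

lemma tot_eq (N K : Int) (A : List Int) (n : ℕ) : TotA N K A n = TotB N K A n n := by
  rw [TotA, TotB]
  have := swap_sum (tg K) (cg N A) n
  simpa [Sg, Wg] using this

-- ===== VERDICT (by name: the statement is the Claim_ definition above) =====
theorem solution_final_spec : Claim_equal_solution_final := by
  intro N K A _ _
  unfold Spec_solution_final
  rw [solA_eq, solB_eq]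
  rcases Nat.eq_zero_or_pos N.toNat with h0 | h1
  · rw [h0]; rfl
  · have hN : 0 ≤ N := by omega
    have ha := gA_fst N K A N.toNat
    have hb := rB_inv N K A hN N.toNat le_rfl
    have hcong : (gA N K A N.toNat).1 ≡ rB N K A N.toNat [ZMOD 1000000007] := by
      refine ha.1.trans ?_
      rw [tot_eq]
      exact (hb.1).symm
    have hab := ha.2 h1
    have hbb := hb.2 h1
    have e1 : (gA N K A N.toNat).1 % 1000000007 = (gA N K A N.toNat).1 :=
      Int.emod_eq_of_lt hab.1 hab.2
    have e2 : rB N K A N.toNat % 1000000007 = rB N K A N.toNat :=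
      Int.emod_eq_of_lt hbb.1 hbb.2
    have := hcong
    rw [Int.ModEq] at this
    rw [e1, e2] at this
    exact this
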